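-- pv_equiv track=rewrite | github.com/rdd48/practice | rosalind_exercises/random_str_intro.py | count_at_gc
-- ===== SOURCE A (Python) =====
-- def count_at_gc(seq):
--     at, gc = 0, 0
--     for i in seq:
--         if i in ['A', 'T']:
--             at += 1
--         elif i in ['G', 'C']:
--             gc += 1
--     return at, gc
-- ===== SOURCE B (Python) =====
-- def count_at_gc(seq):
--     return seq.count('A') + seq.count('T'), seq.count('G') + seq.count('C')
-- ===== Notes on version B (the rewrite author's own statement) =====
-- stated objective: faster
-- what changed: Replaces the single branching Python-level loop with two accumulators by four direct str.count passes summed pairwise (C-level counting).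
import Mathlib
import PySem

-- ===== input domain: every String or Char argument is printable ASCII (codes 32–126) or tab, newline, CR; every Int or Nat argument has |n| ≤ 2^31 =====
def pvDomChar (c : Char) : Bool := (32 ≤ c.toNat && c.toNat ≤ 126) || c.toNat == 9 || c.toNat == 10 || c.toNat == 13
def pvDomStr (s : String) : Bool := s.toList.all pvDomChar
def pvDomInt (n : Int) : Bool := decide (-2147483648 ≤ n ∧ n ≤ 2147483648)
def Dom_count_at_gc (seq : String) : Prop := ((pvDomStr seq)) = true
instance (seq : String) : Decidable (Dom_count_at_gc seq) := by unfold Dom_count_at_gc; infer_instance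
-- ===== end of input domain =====

-- B replaces A's single branching loop by four direct `str.count` passes summed pairwise (same O(n), measurably faster via C-level counting).


-- ===== PORT A =====
-- 'for i in seq' with the two accumulators at, gc; branches in the same order as A.
def count_at_gc (seq : String) : Int × Int :=
  seq.toList.foldl
    (fun (p : Int × Int) i =>
      if ['A', 'T'].contains i then (p.1 + 1, p.2)
      else if ['G', 'C'].contains i then (p.1, p.2 + 1)
      else p)
    (0, 0)

-- ===== PORT B =====
-- seq.count('A') + seq.count('T'), seq.count('G') + seq.count('C')
def count_at_gc_alt (seq : String) : Int × Int :=
  ((PySem.Str.count seq "A" + PySem.Str.count seq "T" : Nat),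
   (PySem.Str.count seq "G" + PySem.Str.count seq "C" : Nat))

-- ===== PRECONDITION & SPEC =====
def Spec_count_at_gc (seq : String) (out : Int × Int) : Prop := out = count_at_gc_alt seq
instance (seq : String) (out : Int × Int) : Decidable (Spec_count_at_gc seq out) := by unfold Spec_count_at_gc; infer_instance

-- ===== CLAIM (what is proved, stated in full; the proofs are below) =====
def Claim_equal_count_at_gc : Prop := ∀ (seq : String), Dom_count_at_gc seq → Spec_count_at_gc seq (count_at_gc seq)

-- ===== LEMMAS AND PROOFS =====

-- Python's substring count with a one-character pattern is element count.
theorem countGo_single (c : Char) : ∀ (l : List Char) (fuel acc : Nat), l.length ≤ fuel →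
    PySem.Chars.count.go [c] fuel l acc = acc + l.count c := by
  intro l
  induction l with
  | nil => intro fuel acc _; cases fuel <;> simp [PySem.Chars.count.go]
  | cons h t ih =>
    intro fuel acc hf
    cases fuel with
    | zero => simp at hf
    | succ n =>
      simp only [PySem.Chars.count.go, List.isPrefixOf, List.length_cons] at *
      by_cases hc : c == h
      · simp only [hc, Bool.true_and, if_pos]
        rw [show List.drop (([] : List Char).length + 1) (h :: t) = t by simp]
        rw [ih n (acc + 1) (by omega)]
        have : h = c := (beq_iff_eq.mp hc).symm
        simp [this]; omega
      · simp only [hc, Bool.false_and, if_neg, Bool.false_eq_true, not_false_iff]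
        rw [ih n acc (by omega)]
        have : ¬ (h = c) := fun e => hc (beq_iff_eq.mpr e.symm)
        simp [this]

theorem count_single (s : List Char) (c : Char) :
    PySem.Chars.count s [c] = s.count c := by
  simp [PySem.Chars.count]
  rw [countGo_single c s s.length 0 le_rfl]
  omega

-- the foldl of A computes the two element counts
theorem foldA (l : List Char) : ∀ (a b : Int),
    l.foldl
      (fun (p : Int × Int) i =>
        if ['A', 'T'].contains i then (p.1 + 1, p.2)
        else if ['G', 'C'].contains i then (p.1, p.2 + 1)
        else p)
      (a, b)
    = (a + l.count 'A' + l.count 'T', b + l.count 'G' + l.count 'C') := by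
  induction l with
  | nil => simp
  | cons h t ih =>
    intro a b
    simp only [List.foldl_cons]
    by_cases h1 : (['A', 'T'] : List Char).contains h
    · simp only [h1, if_pos, ih]
      have : h = 'A' ∨ h = 'T' := by
        simpa using List.contains_iff_mem.mp h1
      rcases this with rfl | rfl <;> simp <;> ring
    · simp only [h1, Bool.false_eq_true, if_neg, not_false_iff]
      by_cases h2 : (['G', 'C'] : List Char).contains h
      · simp only [h2, if_pos, ih]
        have : h = 'G' ∨ h = 'C' := by
          simpa using List.contains_iff_mem.mp h2
        rcases this with rfl | rfl <;> simp <;> ring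
      · simp only [h2, Bool.false_eq_true, if_neg, not_false_iff, ih]
        rw [List.contains_iff_mem] at h1 h2
        simp only [List.mem_cons, List.not_mem_nil, or_false, not_or] at h1 h2
        obtain ⟨hA, hT⟩ := h1
        obtain ⟨hG, hC⟩ := h2
        simp [hA, hT, hG, hC]

-- ===== VERDICT (by name: the statement is the Claim_ definition above) =====
theorem count_at_gc_spec : Claim_equal_count_at_gc := by
  intro seq _
  unfold Spec_count_at_gc count_at_gc count_at_gc_alt
  rw [foldA]
  have hc : ∀ c : Char, PySem.Str.count seq (String.ofList [c]) = seq.toList.count c := by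
    intro c
    rw [show PySem.Str.count seq (String.ofList [c]) = PySem.Chars.count seq.toList [c] from by
      simp [PySem.Str.count]]
    exact count_single _ _
  rw [show ("A" : String) = String.ofList ['A'] from rfl,
      show ("T" : String) = String.ofList ['T'] from rfl,
      show ("G" : String) = String.ofList ['G'] from rfl,
      show ("C" : String) = String.ofList ['C'] from rfl,
      hc, hc, hc, hc]
  push_cast
  ring_nf
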